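-- pv_equiv track=rewrite | github.com/limce21/CODING-TEST | 프로그래머스/1/42840. 모의고사/모의고사.py | solution
-- ===== SOURCE A (Python) =====
-- def check(arr, ans):
--     cnt = 0
--     for i in range(len(arr)):
--         if arr[i] == ans[i]:
--             cnt += 1
--     return cnt
--
-- def solution(answers):
--     answer = []
--     max_value = 0
--     p = [[], [1, 2, 3, 4, 5], [2, 1, 2, 3, 2, 4, 2, 5], [3, 3, 1, 1, 2, 2, 4, 4, 5, 5]]
--
--     for i in range(1, 4):
--         if len(answers) < len(p[i]):
--             arr = p[i][:len(answers)]
--         elif len(answers) == len(p[i]):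
--             arr = p[i]
--         else:
--             q = len(answers) // len(p[i])
--             r = len(answers) % len(p[i])
--             arr = p[i] * q + p[i][:r]
--         cnt = check(arr, answers)
--         if cnt > max_value:
--             answer = [i]
--             max_value = cnt
--         elif cnt == max_value:
--             answer.append(i)
--
--     return answer
-- ===== SOURCE B (Python) =====
-- def solution(answers):
--     p1 = [1, 2, 3, 4, 5]
--     p2 = [2, 1, 2, 3, 2, 4, 2, 5]
--     p3 = [3, 3, 1, 1, 2, 2, 4, 4, 5, 5]
--     s1 = s2 = s3 = 0
--     for i, a in enumerate(answers):
--         if a == p1[i % 5]: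
--             s1 += 1
--         if a == p2[i % 8]:
--             s2 += 1
--         if a == p3[i % 10]:
--             s3 += 1
--     answer = []
--     best = 0
--     for i, cnt in ((1, s1), (2, s2), (3, s3)):
--         if cnt > best:
--             answer = [i]
--             best = cnt
--         elif cnt == best:
--             answer.append(i)
--     return answer
-- ===== Notes on version B (the rewrite author's own statement) =====
-- stated objective: simpler
-- what changed: Replaces the per-pattern tiled-array construction (slice / quotient-remainder replication) plus separate check() scans with one single pass over answers that increments three counters by modular indexing into the fixed patterns.
import Mathlib
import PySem

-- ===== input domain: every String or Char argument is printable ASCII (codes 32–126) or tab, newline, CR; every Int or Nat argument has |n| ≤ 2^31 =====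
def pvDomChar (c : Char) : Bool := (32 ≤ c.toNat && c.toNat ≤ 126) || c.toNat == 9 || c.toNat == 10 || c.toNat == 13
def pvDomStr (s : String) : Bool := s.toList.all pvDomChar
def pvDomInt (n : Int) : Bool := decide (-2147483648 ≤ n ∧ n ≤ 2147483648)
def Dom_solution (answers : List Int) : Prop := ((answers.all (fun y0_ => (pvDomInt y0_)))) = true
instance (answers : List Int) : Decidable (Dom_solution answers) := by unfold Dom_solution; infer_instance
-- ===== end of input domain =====

-- B replaces A's tiled-array construction and per-pattern check() scans by one single pass
-- over answers with three modularly-indexed counters (objective: simpler).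

-- ===== PORT A =====
def check (arr ans : List Int) : Int :=
  (PySem.List.pyRange 0 arr.length 1).foldl
    (fun cnt i => if PySem.List.pyGetD arr i 0 == PySem.List.pyGetD ans i 0 then cnt + 1 else cnt) 0

def solution (answers : List Int) : List Int :=
  let p : List (List Int) := [[], [1, 2, 3, 4, 5], [2, 1, 2, 3, 2, 4, 2, 5], [3, 3, 1, 1, 2, 2, 4, 4, 5, 5]]
  let st := (PySem.List.pyRange 1 4 1).foldl (fun (st : List Int × Int) i =>
    let pi := PySem.List.pyGetD p i []
    let arr :=
      if answers.length < pi.length then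
        PySem.List.slice pi none (some (answers.length : Int))
      else if answers.length == pi.length then
        pi
      else
        let q := PySem.Int.floordiv (answers.length : Int) (pi.length : Int)
        let r := PySem.Int.mod (answers.length : Int) (pi.length : Int)
        PySem.List.pyRepeat pi q ++ PySem.List.slice pi none (some r)
    let cnt := check arr answers
    if cnt > st.2 then ([i], cnt)
    else if cnt == st.2 then (st.1 ++ [i], st.2)
    else st) ([], 0)
  st.1

-- ===== PORT B =====
def solution_alt (answers : List Int) : List Int :=
  let p1 : List Int := [1, 2, 3, 4, 5]
  let p2 : List Int := [2, 1, 2, 3, 2, 4, 2, 5]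
  let p3 : List Int := [3, 3, 1, 1, 2, 2, 4, 4, 5, 5]
  let s := (PySem.List.enumerate answers 0).foldl (fun (s : Int × Int × Int) ia =>
    ((if ia.2 == PySem.List.pyGetD p1 (PySem.Int.mod ia.1 5) 0 then s.1 + 1 else s.1),
     (if ia.2 == PySem.List.pyGetD p2 (PySem.Int.mod ia.1 8) 0 then s.2.1 + 1 else s.2.1),
     (if ia.2 == PySem.List.pyGetD p3 (PySem.Int.mod ia.1 10) 0 then s.2.2 + 1 else s.2.2)))
    (0, 0, 0)
  (([(1, s.1), (2, s.2.1), (3, s.2.2)] : List (Int × Int)).foldl (fun (st : List Int × Int) ic =>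
    if ic.2 > st.2 then ([ic.1], ic.2)
    else if ic.2 == st.2 then (st.1 ++ [ic.1], st.2)
    else st) ([], 0)).1

-- ===== PRECONDITION & SPEC =====
def Spec_solution (answers : List Int) (out : List Int) : Prop := out = solution_alt answers
instance (answers : List Int) (out : List Int) : Decidable (Spec_solution answers out) := by unfold Spec_solution; infer_instance

-- ===== CLAIM (what is proved, stated in full; the proofs are below) =====
def Claim_equal_solution : Prop := ∀ (answers : List Int), Dom_solution answers → Spec_solution answers (solution answers)

-- ===== LEMMAS AND PROOFS =====

-- the count both programs compute for a pattern p: matches of ans[k] against p[k % len p]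
def patCount (p ans : List Int) : Int :=
  ((List.range ans.length).countP (fun k => ans.getD k 0 == p.getD (k % p.length) 0) : Int)

-- A's replicated tiling, elementwise
theorem tile_getD (p : List Int) (m k : Nat) (hk : k < m * p.length) :
    (List.replicate m p).flatten.getD k 0 = p.getD (k % p.length) 0 := by
  induction m generalizing k with
  | zero => simp at hk
  | succ m ih =>
    have hmul : (m + 1) * p.length = m * p.length + p.length := by ring
    simp only [List.replicate_succ, List.flatten_cons]
    by_cases h : k < p.length
    · rw [List.getD_eq_getElem?_getD, List.getElem?_append_left h, Nat.mod_eq_of_lt h,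
        ← List.getD_eq_getElem?_getD]
    · rw [List.getD_eq_getElem?_getD, List.getElem?_append_right (by omega),
        ← List.getD_eq_getElem?_getD, ih (k - p.length) (by omega)]
      congr 1
      conv_rhs => rw [show k = p.length + (k - p.length) by omega]
      rw [Nat.add_mod_left]

theorem check_eq_patCount (p arr ans : List Int)
    (hlen : arr.length = ans.length)
    (hget : ∀ k, k < ans.length → arr.getD k 0 = p.getD (k % p.length) 0) :
    check arr ans = patCount p ans := by
  unfold check patCount
  rw [hlen, PySem.List.pyRange_zero_natCast, List.foldl_map]
  rw [PySem.List.foldl_congr_mem _ _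
      (fun (c : Int) (k : Nat) => if ans.getD k 0 == p.getD (k % p.length) 0 then c + 1 else c) 0
      (by
        intro acc k hkmem
        have hk : k < ans.length := List.mem_range.mp hkmem
        rw [PySem.List.pyGetD_natCast, PySem.List.pyGetD_natCast, hget k hk]
        simp only [List.getD_eq_getElem?_getD, beq_iff_eq]
        by_cases h : ans[k]?.getD 0 = p[k % p.length]?.getD 0
        · simp [h]
        · simp [h, Ne.symm h])]
  rw [PySem.List.foldl_count_if]
  simp

-- the A-side tiled array gives patCount, for every branch of A's construction
theorem tileA_spec (p ans : List Int) (hp : 0 < p.length) :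
    check (if ans.length < p.length then PySem.List.slice p none (some (ans.length : Int))
           else if ans.length == p.length then p
           else PySem.List.pyRepeat p (PySem.Int.floordiv (ans.length : Int) (p.length : Int)) ++
                PySem.List.slice p none (some (PySem.Int.mod (ans.length : Int) (p.length : Int)))) ans
    = patCount p ans := by
  by_cases h1 : ans.length < p.length
  · rw [if_pos h1, PySem.List.slice_to_natCast]
    exact check_eq_patCount p _ ans (by simp; omega)
      (fun k hk => by
        rw [List.getD_eq_getElem?_getD, List.getElem?_take_of_lt hk,
          Nat.mod_eq_of_lt (by omega), ← List.getD_eq_getElem?_getD])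
  · by_cases h2 : ans.length = p.length
    · rw [if_neg h1, if_pos (by simpa using h2)]
      exact check_eq_patCount p p ans h2.symm
        (fun k hk => by rw [Nat.mod_eq_of_lt (by omega)])
    · rw [if_neg h1, if_neg (by simpa using h2)]
      rw [PySem.Int.floordiv_natCast, PySem.Int.mod_natCast, PySem.List.slice_to_natCast]
      unfold PySem.List.pyRepeat
      rw [Int.toNat_natCast]
      have hq : (List.replicate (ans.length / p.length) p).flatten.length
          = ans.length / p.length * p.length := by simp [Nat.mul_comm]
      have hr : ans.length % p.length < p.length := Nat.mod_lt _ hp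
      have hdm := Nat.div_add_mod ans.length p.length
      rw [Nat.mul_comm] at hdm
      have hlen : ((List.replicate (ans.length / p.length) p).flatten ++
          List.take (ans.length % p.length) p).length = ans.length := by
        rw [List.length_append, hq, List.length_take]
        omega
      refine check_eq_patCount p _ ans hlen (fun k hk => ?_)
      by_cases hcase : k < ans.length / p.length * p.length
      · rw [List.getD_eq_getElem?_getD, List.getElem?_append_left (by omega),
          ← List.getD_eq_getElem?_getD]
        exact tile_getD p _ k hcase
      · rw [List.getD_eq_getElem?_getD, List.getElem?_append_right (by omega)]
        simp only [hq]
        rw [List.getElem?_take_of_lt (by omega), ← List.getD_eq_getElem?_getD]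
        congr 1
        conv_rhs => rw [show k = ans.length / p.length * p.length +
          (k - ans.length / p.length * p.length) by omega]
        rw [Nat.mul_add_mod', Nat.mod_eq_of_lt (by omega)]

-- splitting B's triple fold into three independent counters
theorem foldB_split (p1 p2 p3 : List Int) :
    ∀ (l : List (Int × Int)) (a b c : Int),
    l.foldl (fun (s : Int × Int × Int) ia =>
      ((if ia.2 == PySem.List.pyGetD p1 (PySem.Int.mod ia.1 5) 0 then s.1 + 1 else s.1),
       (if ia.2 == PySem.List.pyGetD p2 (PySem.Int.mod ia.1 8) 0 then s.2.1 + 1 else s.2.1),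
       (if ia.2 == PySem.List.pyGetD p3 (PySem.Int.mod ia.1 10) 0 then s.2.2 + 1 else s.2.2)))
      (a, b, c)
    = (l.foldl (fun s ia => if ia.2 == PySem.List.pyGetD p1 (PySem.Int.mod ia.1 5) 0 then s + 1 else s) a,
       l.foldl (fun s ia => if ia.2 == PySem.List.pyGetD p2 (PySem.Int.mod ia.1 8) 0 then s + 1 else s) b,
       l.foldl (fun s ia => if ia.2 == PySem.List.pyGetD p3 (PySem.Int.mod ia.1 10) 0 then s + 1 else s) c) := by
  intro l
  induction l with
  | nil => intro a b c; rfl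
  | cons x xs ih => intro a b c; simp only [List.foldl_cons]; rw [ih]

-- one B-side counter equals patCount (LI is the Int literal modulus of the port, = p.length)
theorem cntB_eq_patCount (p ans : List Int) (LI : Int) (L : Nat)
    (hLI : LI = (L : Int)) (hL : p.length = L) :
    (PySem.List.enumerate ans 0).foldl
      (fun s ia => if ia.2 == PySem.List.pyGetD p (PySem.Int.mod ia.1 LI) 0 then s + 1 else s) 0
    = patCount p ans := by
  subst hLI
  rw [PySem.List.enumerate_eq_map_pyRange ans 0]
  unfold PySem.List.len
  rw [PySem.List.pyRange_zero_natCast, List.map_map, List.foldl_map]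
  unfold patCount
  rw [PySem.List.foldl_congr_mem _ _
      (fun (c : Int) (k : Nat) => if ans.getD k 0 == p.getD (k % p.length) 0 then c + 1 else c) 0
      (by
        intro acc k _
        simp only [Function.comp, PySem.List.pyGetD_natCast, hL]
        rw [PySem.Int.mod_natCast k L, PySem.List.pyGetD_natCast])]
  rw [PySem.List.foldl_count_if]
  simp

-- ===== VERDICT (by name: the statement is the Claim_ definition above) =====
theorem solution_spec : Claim_equal_solution := by
  intro answers _
  unfold Spec_solution solution solution_alt
  rw [show PySem.List.pyRange 1 4 1 = [1, 2, 3] from by decide]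
  simp only [List.foldl_cons, List.foldl_nil,
    show PySem.List.pyGetD [([]:List Int), [1,2,3,4,5], [2,1,2,3,2,4,2,5], [3,3,1,1,2,2,4,4,5,5]] (1:Int) ([]:List Int) = [1,2,3,4,5] from by decide,
    show PySem.List.pyGetD [([]:List Int), [1,2,3,4,5], [2,1,2,3,2,4,2,5], [3,3,1,1,2,2,4,4,5,5]] (2:Int) ([]:List Int) = [2,1,2,3,2,4,2,5] from by decide,
    show PySem.List.pyGetD [([]:List Int), [1,2,3,4,5], [2,1,2,3,2,4,2,5], [3,3,1,1,2,2,4,4,5,5]] (3:Int) ([]:List Int) = [3,3,1,1,2,2,4,4,5,5] from by decide]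
  rw [foldB_split]
  rw [cntB_eq_patCount [1,2,3,4,5] answers 5 5 rfl rfl,
      cntB_eq_patCount [2,1,2,3,2,4,2,5] answers 8 8 rfl rfl,
      cntB_eq_patCount [3,3,1,1,2,2,4,4,5,5] answers 10 10 rfl rfl]
  rw [tileA_spec [1,2,3,4,5] answers (by norm_num),
      tileA_spec [2,1,2,3,2,4,2,5] answers (by norm_num),
      tileA_spec [3,3,1,1,2,2,4,4,5,5] answers (by norm_num)]
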